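-- pv_equiv track=rewrite | github.com/mattgonzalesced/CED_Extensions | AE pyTools.extension/AE pyTools.Tab/MEPRFP Automation 2.0.panel/lib/truth_groups.py | group_members_by_source
-- ===== SOURCE A (Python) =====
-- TRUTH_SOURCE_ID_KEY = "ced_truth_source_id"
--
-- def group_members_by_source(profiles):
--     """Index ``{source_id: [member_profile, ...]}`` over the input list."""
--     out = {}
--     for p in profiles or ():
--         if not isinstance(p, dict):
--             continue
--         sid = p.get(TRUTH_SOURCE_ID_KEY)
--         if not sid:
--             continue
--         if p.get("id") == sid:
--             continue  # the source itself, skip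
--         out.setdefault(sid, []).append(p)
--     return out
-- ===== SOURCE B (Python) =====
-- TRUTH_SOURCE_ID_KEY = "ced_truth_source_id"
--
--
-- def group_members_by_source(profiles):
--     """Index ``{source_id: [member_profile, ...]}`` over the input list.
--
--     Alternative decomposition: filter the valid members once, then build the
--     first-occurrence key order, then collect each group with a per-key scan.
--     """
--     def source_id(p):
--         return p.get(TRUTH_SOURCE_ID_KEY)
--
--     members = [p for p in (profiles or ())
--                if isinstance(p, dict)
--                and source_id(p)
--                and p.get("id") != source_id(p)]
--     order = []
--     for p in members:
--         if source_id(p) not in order: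
--             order.append(source_id(p))
--     return {sid: [p for p in members if source_id(p) == sid] for sid in order}
-- ===== Notes on version B (the rewrite author's own statement) =====
-- stated objective: alternative
-- what changed: Replaces A's single accumulate-into-dict pass (setdefault+append) with a three-stage pipeline: filter the valid members into a flat list, build the first-occurrence key order, then collect each group by a per-key scan over the filtered list.
import Mathlib
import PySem

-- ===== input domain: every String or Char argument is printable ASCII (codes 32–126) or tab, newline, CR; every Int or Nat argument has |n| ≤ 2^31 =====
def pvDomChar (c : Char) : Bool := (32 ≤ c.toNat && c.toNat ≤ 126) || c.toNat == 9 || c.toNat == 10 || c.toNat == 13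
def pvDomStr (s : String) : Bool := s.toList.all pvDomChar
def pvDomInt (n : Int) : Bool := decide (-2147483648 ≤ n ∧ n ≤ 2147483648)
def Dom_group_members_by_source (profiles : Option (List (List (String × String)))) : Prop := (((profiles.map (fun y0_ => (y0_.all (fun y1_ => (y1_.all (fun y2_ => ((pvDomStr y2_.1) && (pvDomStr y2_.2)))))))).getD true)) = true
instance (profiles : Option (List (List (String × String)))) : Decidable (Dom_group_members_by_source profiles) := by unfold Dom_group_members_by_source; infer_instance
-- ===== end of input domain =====

-- B replaces A's single setdefault/append dict pass by a filter + first-occurrence key order + per-key collection pipeline (alternative decomposition, not faster).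


-- ===== PORT A =====
-- Every element is a dict in the typed model, so `isinstance(p, dict)` is always true.
-- `p.get(k)` is `(PySem.Dict.mk p).get? k` (first-match lookup); `not sid` is `none` or `some ""`.
def group_members_by_source (profiles : Option (List (List (String × String)))) : List (String × List (List (String × String))) :=
  ((profiles.getD []).foldl
    (fun out p =>
      match (PySem.Dict.mk p).get? "ced_truth_source_id" with
      | none => out
      | some sid =>
        if sid = "" then out
        else if (PySem.Dict.mk p).get? "id" = some sid then out
        else PySem.Dict.modify out sid [] (· ++ [p]))
    PySem.Dict.empty).items

-- ===== PORT B =====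
-- `source_id(p)` is `(PySem.Dict.mk p).get? "ced_truth_source_id"`; on members it is
-- `some sid` with `sid ≠ ""`, so `source_id(p) == sid` is `get? … == some sid`.
-- The `if … not in order: order.append` loop is PySem.Set.add (its definition).
def group_members_by_source_alt (profiles : Option (List (List (String × String)))) : List (String × List (List (String × String))) :=
  let xs := profiles.getD []
  let members := xs.filter (fun p =>
    match (PySem.Dict.mk p).get? "ced_truth_source_id" with
    | none => false
    | some sid => sid ≠ "" && !((PySem.Dict.mk p).get? "id" == some sid))
  let order : PySem.Set String := members.foldl
    (fun acc p => PySem.Set.add acc (((PySem.Dict.mk p).get? "ced_truth_source_id").getD "")) []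
  order.map (fun sid =>
    (sid, members.filter (fun p => (PySem.Dict.mk p).get? "ced_truth_source_id" == some sid)))

-- ===== PRECONDITION & SPEC =====
def Spec_group_members_by_source (profiles : Option (List (List (String × String)))) (out : List (String × List (List (String × String)))) : Prop := out = group_members_by_source_alt profiles
instance (profiles : Option (List (List (String × String)))) (out : List (String × List (List (String × String)))) : Decidable (Spec_group_members_by_source profiles out) := by unfold Spec_group_members_by_source; infer_instance

-- ===== CLAIM (what is proved, stated in full; the proofs are below) =====
def Claim_equal_group_members_by_source : Prop := ∀ (profiles : Option (List (List (String × String)))), Dom_group_members_by_source profiles → Spec_group_members_by_source profiles (group_members_by_source profiles)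

-- ===== LEMMAS AND PROOFS =====

-- The (source id, profile) pair of a valid member, `none` when a guard rejects p.
def pvValid (p : List (String × String)) : Option (String × List (String × String)) :=
  match (PySem.Dict.mk p).get? "ced_truth_source_id" with
  | none => none
  | some sid =>
    if sid = "" then none
    else if (PySem.Dict.mk p).get? "id" = some sid then none
    else some (sid, p)

theorem pvA_foldl (xs : List (List (String × String)))
    (d : PySem.Dict String (List (List (String × String)))) :
    xs.foldl
      (fun out p =>
        match (PySem.Dict.mk p).get? "ced_truth_source_id" with
        | none => out
        | some sid =>
          if sid = "" then out
          else if (PySem.Dict.mk p).get? "id" = some sid then out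
          else PySem.Dict.modify out sid [] (· ++ [p])) d
    = (xs.filterMap pvValid).foldl (fun d q => d.modify q.1 [] (· ++ [q.2])) d := by
  induction xs generalizing d with
  | nil => rfl
  | cons p t ih =>
    simp only [List.foldl_cons, List.filterMap_cons, pvValid]
    cases h : (PySem.Dict.mk p).get? "ced_truth_source_id" with
    | none => exact ih d
    | some sid =>
      by_cases h1 : sid = "" <;> simp only [h1, if_true, if_false]
      · exact ih d
      · by_cases h2 : (PySem.Dict.mk p).get? "id" = some sid <;>
          simp only [h2, if_true, if_false, List.foldl_cons]
        · exact ih d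
        · exact ih _

theorem pvFilterMap_ite {α β : Type} (P : α → Bool) (f : α → β) (l : List α) :
    l.filterMap (fun x => if P x then some (f x) else none) = (l.filter P).map f := by
  induction l with
  | nil => rfl
  | cons a t ih =>
    by_cases h : P a <;> simp [h, ih]

theorem pvValid_mem_filter (xs : List (List (String × String))) :
    xs.filterMap pvValid
      = (xs.filter (fun p =>
          match (PySem.Dict.mk p).get? "ced_truth_source_id" with
          | none => false
          | some sid => sid ≠ "" && !((PySem.Dict.mk p).get? "id" == some sid))).map
        (fun p => (((PySem.Dict.mk p).get? "ced_truth_source_id").getD "", p)) := by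
  rw [← pvFilterMap_ite]
  apply List.filterMap_congr
  intro p _
  unfold pvValid
  cases h : (PySem.Dict.mk p).get? "ced_truth_source_id" with
  | none => simp
  | some sid =>
    by_cases h1 : sid = ""
    · simp [h1]
    · by_cases h2 : (PySem.Dict.mk p).get? "id" = some sid
      · simp [h1, h2]
      · simp [h1, h2]

theorem pvMember_get (p : List (String × String))
    (h : (match (PySem.Dict.mk p).get? "ced_truth_source_id" with
          | none => false
          | some sid => sid ≠ "" && !((PySem.Dict.mk p).get? "id" == some sid)) = true) :
    (PySem.Dict.mk p).get? "ced_truth_source_id"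
      = some (((PySem.Dict.mk p).get? "ced_truth_source_id").getD "") := by
  cases hg : (PySem.Dict.mk p).get? "ced_truth_source_id" with
  | none => rw [hg] at h; simp at h
  | some sid => simp

-- ===== VERDICT (by name: the statement is the Claim_ definition above) =====
theorem group_members_by_source_spec : Claim_equal_group_members_by_source := by
  intro profiles _
  unfold Spec_group_members_by_source group_members_by_source group_members_by_source_alt
  dsimp only
  rw [pvA_foldl, pvValid_mem_filter]
  generalize hm : (profiles.getD []).filter (fun p =>
    match (PySem.Dict.mk p).get? "ced_truth_source_id" with
    | none => false
    | some sid => sid ≠ "" && !((PySem.Dict.mk p).get? "id" == some sid)) = members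
  rw [← PySem.Set.update_map_eq_foldl_add members
        (fun p => ((PySem.Dict.mk p).get? "ced_truth_source_id").getD "") [],
      PySem.Set.update_nil_left]
  have hkeys : ((members.map (fun p =>
        (((PySem.Dict.mk p).get? "ced_truth_source_id").getD "", p))).foldl
        (fun d q => d.modify q.1 [] (· ++ [q.2]))
        (PySem.Dict.empty : PySem.Dict String (List (List (String × String))))).keys
      = PySem.Set.ofList (members.map
          (fun p => ((PySem.Dict.mk p).get? "ced_truth_source_id").getD "")) := by
    rw [PySem.Dict.keys_foldl_modify_key _ Prod.fst [] (fun _ q => (· ++ [q.2])),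
        PySem.Dict.keys_empty, PySem.Set.update_nil_left, List.map_map]
    rfl
  rw [PySem.Dict.items_eq_map_keys _ (by rw [hkeys]; exact PySem.Set.nodup_ofList _) [], hkeys]
  apply List.map_congr_left
  intro k _
  refine Prod.ext rfl ?_
  rw [PySem.Dict.getD_foldl_modify_append, PySem.Dict.getD_empty, List.nil_append,
      List.filter_map, List.map_map]
  simp only [Function.comp_def]
  rw [List.map_id']
  apply List.filter_congr
  intro p hp
  have hpred := List.of_mem_filter (hm ▸ hp)
  rw [pvMember_get p hpred]
  simp
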